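-- pv_equiv track=rewrite | github.com/cindyLuo99/skim-Data-_15112 | TP3 skim(Data).py | sortedDoW
-- ===== SOURCE A (Python) =====
-- def sortedDoW(list):
--     dayOfWeek = {"Sunday":0, "Monday":1, "Tuesday":2,"Wednesday":3,"Thursday":4,
--                 "Friday":5, "Saturday":6}
--     newList = [None]*7
--     for day in list:
--         index = dayOfWeek[day]
--         newList[index] = day
--     while None in newList:
--         newList.remove(None)
--     return newList
-- ===== SOURCE B (Python) =====
-- def sortedDoW(list):
--     dayOfWeek = {"Sunday":0, "Monday":1, "Tuesday":2,"Wednesday":3,"Thursday":4,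
--                 "Friday":5, "Saturday":6}
--     return sorted(set(list), key=dayOfWeek.__getitem__)
-- ===== Notes on version B (the rewrite author's own statement) =====
-- stated objective: idiomatic
-- what changed: Replaces the scatter-into-a-fixed-7-slot-array-then-strip-Nones construction with deduplicating the input (set) and a comparison sort keyed by the weekday-order table.
import Mathlib
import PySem

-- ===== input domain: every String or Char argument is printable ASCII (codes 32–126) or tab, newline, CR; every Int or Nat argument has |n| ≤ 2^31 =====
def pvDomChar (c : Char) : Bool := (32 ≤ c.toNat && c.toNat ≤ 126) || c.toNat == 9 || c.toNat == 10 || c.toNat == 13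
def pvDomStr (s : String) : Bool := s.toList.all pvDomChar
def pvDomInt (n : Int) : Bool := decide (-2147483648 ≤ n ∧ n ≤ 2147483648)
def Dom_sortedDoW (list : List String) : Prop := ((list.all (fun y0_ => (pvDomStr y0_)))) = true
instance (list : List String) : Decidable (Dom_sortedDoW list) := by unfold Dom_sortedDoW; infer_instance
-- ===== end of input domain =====

-- B replaces A's scatter-into-a-fixed-7-slot-array-then-strip-Nones by dedup (set) plus a sort
-- keyed by the weekday table (objective: idiomatic). Equivalence is about the return value.

-- ===== PORT A =====
-- the weekday table both Pythons build literally
def pvDayDict : PySem.Dict String Int :=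
  PySem.Dict.ofList [("Sunday", 0), ("Monday", 1), ("Tuesday", 2), ("Wednesday", 3),
                     ("Thursday", 4), ("Friday", 5), ("Saturday", 6)]

-- 'while None in newList: newList.remove(None)' — remove the first None while one is present
def pvRemoveNones (xs : List (Option String)) : List (Option String) :=
  if h : (none : Option String) ∈ xs then pvRemoveNones (xs.erase none) else xs
termination_by xs.length
decreasing_by
  have hp := List.length_pos_of_mem h
  have he := List.length_erase_of_mem h
  omega

def sortedDoW (list : List String) : List String :=
  -- the for-loop; 'dayOfWeek[day]' raises KeyError on an unknown day → the fold state is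
  -- Option, none = raised (excluded by Pre_). The slot index is always 0..6 so '.toNat' is exact.
  match list.foldl
      (fun acc day => acc.bind fun nl =>
        (pvDayDict.get? day).map fun idx => nl.set idx.toNat (some day))
      (some (List.replicate 7 (none : Option String))) with
  | none => []                       -- Python raises KeyError here; outside Pre_
  | some nl => (pvRemoveNones nl).filterMap id   -- after the while loop no None is left: the list of the set slots

-- ===== PORT B =====
def sortedDoW_alt (list : List String) : List String :=
  PySem.List.sorted (PySem.Set.ofList list) (fun d => pvDayDict.getD d 0) false

-- ===== PRECONDITION & SPEC =====
-- Pre_: every element is a known weekday name; otherwise Python A (and B) raise KeyError.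
def Pre_sortedDoW (list : List String) : Prop :=
  ∀ d ∈ list, pvDayDict.contains d = true
instance (list : List String) : Decidable (Pre_sortedDoW list) := by
  unfold Pre_sortedDoW; infer_instance
def pvWitness_sortedDoW : List String := ["Friday", "Monday", "Monday", "Sunday"]

def Spec_sortedDoW (list : List String) (out : List String) : Prop := out = sortedDoW_alt list
instance (list : List String) (out : List String) : Decidable (Spec_sortedDoW list out) := by unfold Spec_sortedDoW; infer_instance

-- ===== CLAIM (what is proved, stated in full; the proofs are below) =====
def Claim_equal_sortedDoW : Prop := ∀ (list : List String), Dom_sortedDoW list → Pre_sortedDoW list → Spec_sortedDoW list (sortedDoW list)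

-- ===== LEMMAS AND PROOFS =====

-- the canonical week, Sunday first
def pvDays : List String :=
  ["Sunday", "Monday", "Tuesday", "Wednesday", "Thursday", "Friday", "Saturday"]

-- A's slot array after processing the days of p: slot i holds day i iff day i occurred
def pvMask (p : List String) : List (Option String) :=
  pvDays.map (fun d => if d ∈ p then some d else none)

theorem pv_contains_iff (d : String) :
    pvDayDict.contains d = true ↔ d ∈ pvDays := by
  have hk : pvDayDict.keys = pvDays := by decide
  rw [PySem.Dict.contains_iff_mem_keys, hk]

theorem pv_mask_set (p : List String) (x : String) (hx : x ∈ pvDays) :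
    ∃ idx, pvDayDict.get? x = some idx ∧
      (pvMask p).set idx.toNat (some x) = pvMask (p ++ [x]) := by
  fin_cases hx <;>
    exact ⟨_, rfl, by
      simp [pvMask, pvDays, List.set, List.mem_append]⟩

theorem pv_fold_mask (l : List String) : ∀ (p : List String), (∀ d ∈ l, d ∈ pvDays) →
    l.foldl
      (fun acc day => acc.bind fun nl =>
        (pvDayDict.get? day).map fun idx => nl.set idx.toNat (some day))
      (some (pvMask p)) = some (pvMask (p ++ l)) := by
  induction l with
  | nil => intro p _; simp
  | cons x t ih =>
    intro p hall
    obtain ⟨idx, hget, hset⟩ := pv_mask_set p x (hall x (by simp))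
    simp only [List.foldl_cons, Option.bind_some, hget, Option.map_some, hset]
    have := ih (p ++ [x]) (fun d hd => hall d (by simp [hd]))
    simpa using this

theorem pv_removeNones_eq_filter (xs : List (Option String)) :
    pvRemoveNones xs = xs.filter (fun o => o.isSome) := by
  induction hn : xs.length using Nat.strong_induction_on generalizing xs with
  | _ n ih =>
    rw [pvRemoveNones]
    split
    · rename_i h
      have hlen : (xs.erase none).length < n := by
        have := List.length_erase_of_mem h
        have := List.length_pos_of_mem h
        omega
      rw [ih _ hlen _ rfl]
      -- filtering isSome ignores the erased none
      clear ih hlen hn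
      induction xs with
      | nil => simp at h
      | cons y t iht =>
        by_cases hy : y = none
        · subst hy; simp
        · have hyt : (none : Option String) ∈ t := by
            rcases List.mem_cons.mp h with h1 | h1
            · exact absurd h1.symm hy
            · exact h1
          have : (y :: t).erase none = y :: t.erase none := by
            simp [hy]
          rw [this]
          simp only [List.filter_cons, iht hyt]
    · rename_i h
      exact (List.filter_eq_self.mpr
        (fun a ha => Option.isSome_iff_ne_none.mpr (fun e => h (e ▸ ha)))).symm

theorem pv_filter_mask (l : List String) : ∀ (ds : List String),
    ((ds.map (fun d => if d ∈ l then some d else none)).filter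
        (fun o => o.isSome)).filterMap id
      = ds.filter (fun d => decide (d ∈ l)) := by
  intro ds
  induction ds with
  | nil => rfl
  | cons d t ih =>
    by_cases hd : d ∈ l <;> simpa [hd, List.filter_cons] using ih

theorem pv_A_eq (list : List String) (hall : ∀ d ∈ list, d ∈ pvDays) :
    sortedDoW list = pvDays.filter (fun d => decide (d ∈ list)) := by
  unfold sortedDoW
  have h0 : (List.replicate 7 (none : Option String)) = pvMask [] := by decide
  rw [h0, pv_fold_mask list [] hall]
  simp only [List.nil_append]
  rw [pv_removeNones_eq_filter, pvMask, pv_filter_mask]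

theorem pv_B_eq (list : List String) (hall : ∀ d ∈ list, d ∈ pvDays) :
    sortedDoW_alt list = pvDays.filter (fun d => decide (d ∈ list)) := by
  unfold sortedDoW_alt
  apply PySem.List.sorted_eq_of_perm_of_pairwise_lt
  · rw [List.perm_ext_iff_of_nodup
      (List.Nodup.filter _ (by decide)) (PySem.Set.nodup_ofList list)]
    intro a
    simp only [List.mem_filter, decide_eq_true_eq, PySem.Set.mem_ofList]
    exact ⟨fun h => h.2, fun h => ⟨hall a h, h⟩⟩
  · have hp : pvDays.Pairwise (fun a b => pvDayDict.getD a 0 < pvDayDict.getD b 0) := by decide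
    exact List.Pairwise.sublist List.filter_sublist hp

-- ===== VERDICT (by name: the statement is the Claim_ definition above) =====
theorem sortedDoW_spec : Claim_equal_sortedDoW := by
  intro list _ hpre
  unfold Spec_sortedDoW
  have hall : ∀ d ∈ list, d ∈ pvDays := fun d hd => (pv_contains_iff d).mp (hpre d hd)
  rw [pv_A_eq list hall, pv_B_eq list hall]
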